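-- pv_equiv track=rewrite | github.com/CptWang/TRIDENT | run_batch_multimodal.py | allocate_balanced
-- ===== SOURCE A (Python) =====
-- def allocate_balanced(total: int, availability: dict[str, int]) -> dict[str, int]:
--     keys = list(availability.keys())
--     alloc = {k: 0 for k in keys}
--     if total <= 0 or not keys:
--         return alloc
--
--     target_total = min(int(total), int(sum(max(0, v) for v in availability.values())))
--     base = target_total // len(keys)
--     rem = target_total % len(keys)
--
--     for i, key in enumerate(keys):
--         alloc[key] = min(max(0, availability[key]), base + (1 if i < rem else 0))
--
--     assigned = sum(alloc.values())
--     while assigned < target_total: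
--         progressed = False
--         for key in keys:
--             if alloc[key] < max(0, availability[key]):
--                 alloc[key] += 1
--                 assigned += 1
--                 progressed = True
--                 if assigned >= target_total:
--                     break
--         if not progressed:
--             break
--
--     return alloc
-- ===== SOURCE B (Python) =====
-- def allocate_balanced(total: int, availability: dict[str, int]) -> dict[str, int]:
--     keys = list(availability)
--     n = len(keys)
--     if total <= 0 or n == 0:
--         return dict.fromkeys(keys, 0)
--     caps = [max(0, v) for v in availability.values()]
--     target = min(int(total), sum(caps))
--     base, rem = divmod(target, n)
--     init = [min(c, base + (1 if i < rem else 0)) for i, c in enumerate(caps)]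
--
--     def filled(t):
--         return sum(min(c, x + t) for c, x in zip(caps, init))
--
--     # binary search the largest water level t in [0, max(caps)] with filled(t) <= target
--     lo, hi = 0, max(caps)
--     while lo < hi:
--         mid = (lo + hi + 1) // 2
--         if filled(mid) <= target:
--             lo = mid
--         else:
--             hi = mid - 1
--     level = [min(c, x + lo) for c, x in zip(caps, init)]
--     rest = target - sum(level)
--     out = []
--     for k, c, v in zip(keys, caps, level):
--         if rest > 0 and v < c:
--             out.append((k, v + 1))
--             rest -= 1
--         else:
--             out.append((k, v))
--     return dict(out)
-- ===== Notes on version B (the rewrite author's own statement) =====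
-- stated objective: faster
-- what changed: A fills the allocation one unit at a time with a round-robin while-loop over the keys; B computes the final water level in closed form by binary search on the filled-sum function and then does a single partial pass in key order, removing the per-unit loop entirely.
import Mathlib
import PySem

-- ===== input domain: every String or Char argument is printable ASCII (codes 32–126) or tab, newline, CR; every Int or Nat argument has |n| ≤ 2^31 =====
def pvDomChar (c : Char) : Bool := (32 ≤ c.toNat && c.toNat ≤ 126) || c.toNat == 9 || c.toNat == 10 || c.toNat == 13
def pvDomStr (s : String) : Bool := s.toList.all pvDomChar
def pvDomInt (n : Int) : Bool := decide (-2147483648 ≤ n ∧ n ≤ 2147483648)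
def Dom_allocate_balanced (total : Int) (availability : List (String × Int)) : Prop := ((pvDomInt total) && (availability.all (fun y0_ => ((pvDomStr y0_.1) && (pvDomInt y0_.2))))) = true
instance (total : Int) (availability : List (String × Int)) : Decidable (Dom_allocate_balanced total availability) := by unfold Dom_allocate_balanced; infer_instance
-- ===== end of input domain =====

-- B replaces A's one-unit-at-a-time round-robin while-loop by a binary search for the
-- water level plus a single partial pass in key order (objective: faster).

-- ===== PORT A =====
-- the inner `for key in keys:` loop of the while, with its break
def pvPassA (avail : PySem.Dict String Int) (target : Int) :
    List String → PySem.Dict String Int → Int → Bool → PySem.Dict String Int × Int × Bool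
  | [], alloc, assigned, progressed => (alloc, assigned, progressed)
  | k :: ks, alloc, assigned, progressed =>
      if alloc.getD k 0 < max 0 (avail.getD k 0) then
        let alloc' := alloc.insert k (alloc.getD k 0 + 1)
        if assigned + 1 ≥ target then (alloc', assigned + 1, true)
        else pvPassA avail target ks alloc' (assigned + 1) true
      else pvPassA avail target ks alloc assigned progressed

-- the `while assigned < target_total:` loop; each recursing iteration strictly increases
-- `assigned`, so fuel `target.toNat + 1` is never exhausted (proved in the lemmas below)
def pvWhileA (avail : PySem.Dict String Int) (keys : List String) (target : Int) :
    Nat → PySem.Dict String Int → Int → PySem.Dict String Int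
  | 0, alloc, _ => alloc
  | fuel + 1, alloc, assigned =>
      if assigned < target then
        let r := pvPassA avail target keys alloc assigned false
        if r.2.2 = true then pvWhileA avail keys target fuel r.1 r.2.1
        else r.1
      else alloc

def allocate_balanced (total : Int) (availability : List (String × Int)) : List (String × Int) :=
  let avail := PySem.Dict.ofList availability
  let keys := avail.keys
  let alloc := keys.foldl (fun d k => d.insert k 0) PySem.Dict.empty
  if total ≤ 0 ∨ keys = [] then alloc.items
  else
    let target := min total ((avail.values.map (fun v => max 0 v)).sum)
    let base := PySem.Int.floordiv target (keys.length : Int)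
    let rem := PySem.Int.mod target (keys.length : Int)
    -- `availability[key]` cannot raise here: every key comes from the dict itself
    let alloc := (PySem.List.enumerate keys).foldl
      (fun d p => d.insert p.2 (min (max 0 (avail.getD p.2 0)) (base + if p.1 < rem then 1 else 0))) alloc
    let assigned := alloc.values.sum
    (pvWhileA avail keys target (target.toNat + 1) alloc assigned).items

-- ===== PORT B =====
def pvLevelB (caps init : List Int) (t : Int) : List Int :=
  (caps.zip init).map (fun p => min p.1 (p.2 + t))

def pvFilledB (caps init : List Int) (t : Int) : Int :=
  (pvLevelB caps init t).sum

-- `while lo < hi:` of the binary search; the bracket shrinks every iteration, so fuel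
-- `hi.toNat + 1` is never exhausted
def pvSearchB (caps init : List Int) (target : Int) :
    Nat → Int → Int → Int
  | 0, lo, _ => lo
  | fuel + 1, lo, hi =>
      if lo < hi then
        let mid := PySem.Int.floordiv (lo + hi + 1) 2
        if pvFilledB caps init mid ≤ target then pvSearchB caps init target fuel mid hi
        else pvSearchB caps init target fuel lo (mid - 1)
      else lo

-- the final `for k, c, v in zip(keys, caps, level):` loop
def pvFillB : List (String × Int × Int) → Int → List (String × Int)
  | [], _ => []
  | (k, c, v) :: row, rest =>
      if 0 < rest ∧ v < c then (k, v + 1) :: pvFillB row (rest - 1)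
      else (k, v) :: pvFillB row rest

def allocate_balanced_alt (total : Int) (availability : List (String × Int)) : List (String × Int) :=
  let d := PySem.Dict.ofList availability
  let keys := d.keys
  let n := keys.length
  if total ≤ 0 ∨ n = 0 then (PySem.List.dedup keys).map (fun k => (k, 0))
  else
    let caps := d.values.map (fun v => max 0 v)
    let target := min total caps.sum
    let base := PySem.Int.floordiv target (n : Int)
    let rem := PySem.Int.mod target (n : Int)
    let init := (PySem.List.enumerate caps).map (fun p => min p.2 (base + if p.1 < rem then 1 else 0))
    -- `max(caps)`: caps is nonempty here, so the `none` branch is unreachable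
    let hi := match PySem.List.max? caps (fun x => x) with | some m => m | none => 0
    let lo := pvSearchB caps init target (hi.toNat + 1) 0 hi
    let level := pvLevelB caps init lo
    let rest := target - level.sum
    (PySem.Dict.ofList (pvFillB (keys.zip (caps.zip level)) rest)).items

-- ===== PRECONDITION & SPEC =====
-- Pre_ excludes association lists with duplicate keys: those do not represent any Python
-- dict argument (A's parameter is a dict), so A is never run on them.
def Pre_allocate_balanced (total : Int) (availability : List (String × Int)) : Prop :=
  (availability.map Prod.fst).Nodup
instance (total : Int) (availability : List (String × Int)) : Decidable (Pre_allocate_balanced total availability) := by unfold Pre_allocate_balanced; infer_instance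

def pvWitness_allocate_balanced : Int × (List (String × Int)) := (5, [("a", 3), ("b", 1), ("c", 4)])

def Spec_allocate_balanced (total : Int) (availability : List (String × Int)) (out : List (String × Int)) : Prop := out = allocate_balanced_alt total availability
instance (total : Int) (availability : List (String × Int)) (out : List (String × Int)) : Decidable (Spec_allocate_balanced total availability out) := by unfold Spec_allocate_balanced; infer_instance

-- ===== CLAIM (what is proved, stated in full; the proofs are below) =====
def Claim_equal_allocate_balanced : Prop := ∀ (total : Int) (availability : List (String × Int)), Dom_allocate_balanced total availability → Pre_allocate_balanced total availability → Spec_allocate_balanced total availability (allocate_balanced total availability)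

-- ===== LEMMAS AND PROOFS =====

-- model of the values produced by one (possibly partial) round-robin pass with a budget
def pvFillVals : List Int → List Int → Int → List Int
  | c :: cs, x :: u, b =>
      if 0 < b ∧ x < c then (x + 1) :: pvFillVals cs u (b - 1) else x :: pvFillVals cs u b
  | _, u, _ => u

-- number of keys still below their cap
def pvUnsat (cs u : List Int) : Int :=
  ((cs.zip u).countP (fun p => decide (p.2 < p.1)) : Int)

-- the canonical final value list at water level t
def pvOut (caps init : List Int) (target t : Int) : List Int :=
  pvFillVals caps (pvLevelB caps init t) (target - pvFilledB caps init t)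

-- a valid stopping level for the water filling
def pvGood (caps init : List Int) (target t : Int) : Prop :=
  0 ≤ t ∧ pvFilledB caps init t ≤ target ∧ target ≤ pvFilledB caps init (t + 1)

theorem pv_fillVals_nonpos : ∀ (cs u : List Int) (b : Int), b ≤ 0 → pvFillVals cs u b = u := by
  intro cs
  induction cs with
  | nil => intro u b _; cases u <;> rfl
  | cons c cs ih =>
    intro u b hb
    cases u with
    | nil => rfl
    | cons x u => simp [pvFillVals, ih u (b := b), hb]

theorem pv_unsat_nonneg (cs u : List Int) : 0 ≤ pvUnsat cs u := by
  simp [pvUnsat]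

theorem pv_unsat_cons (c x : Int) (cs u : List Int) :
    pvUnsat (c :: cs) (x :: u) = (if x < c then 1 else 0) + pvUnsat cs u := by
  simp only [pvUnsat, List.zip_cons_cons, List.countP_cons, decide_eq_true_eq]
  by_cases h : x < c <;> simp [h] <;> push_cast <;> ring

theorem pv_sum_le_of_forall₂ : ∀ {l1 l2 : List Int}, List.Forall₂ (· ≤ ·) l1 l2 → l1.sum ≤ l2.sum := by
  intro l1 l2 h
  induction h with
  | nil => simp
  | cons hx _ ih => simpa using add_le_add hx ih

theorem pv_eq_of_forall₂_le_sum : ∀ {l1 l2 : List Int}, List.Forall₂ (· ≤ ·) l1 l2 → l2.sum ≤ l1.sum → l1 = l2 := by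
  intro l1 l2 h
  induction h with
  | nil => intro _; rfl
  | cons hx htail ih =>
    intro hs
    simp only [List.sum_cons] at hs
    have hts := pv_sum_le_of_forall₂ htail
    have : _ = _ := ih (by omega)
    simp [this]
    omega

theorem pv_map_eq_zip_of_forall₂ {g : String → Int} :
    ∀ {ks : List String} {u : List Int}, List.Forall₂ (fun k x => g k = x) ks u →
      ks.map (fun k => (k, g k)) = ks.zip u := by
  intro ks u h
  induction h with
  | nil => rfl
  | cons hx _ ih => simp_all

theorem pv_map_eq_of_forall₂ {g : String → Int} :
    ∀ {ks : List String} {u : List Int}, List.Forall₂ (fun k x => g k = x) ks u →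
      ks.map g = u := by
  intro ks u h
  induction h with
  | nil => rfl
  | cons hx _ ih => simp_all


theorem pv_level_cons (c x t : Int) (cs u : List Int) :
    pvLevelB (c :: cs) (x :: u) t = min c (x + t) :: pvLevelB cs u t := rfl

theorem pv_filled_cons (c x t : Int) (cs u : List Int) :
    pvFilledB (c :: cs) (x :: u) t = min c (x + t) + pvFilledB cs u t := by
  simp [pvFilledB, pv_level_cons]

theorem pv_level_zero : ∀ {caps init : List Int}, List.Forall₂ (fun x c => 0 ≤ x ∧ x ≤ c) init caps →
    pvLevelB caps init 0 = init := by
  intro caps init h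
  induction h with
  | nil => rfl
  | cons hx _ ih =>
    simp only [pvLevelB, List.zip_cons_cons, List.map_cons] at *
    exact by rw [ih]; congr 1; omega

theorem pv_level_le : ∀ (caps init : List Int), init.length = caps.length → ∀ (t : Int),
    List.Forall₂ (fun v c => v ≤ c) (pvLevelB caps init t) caps := by
  intro caps
  induction caps with
  | nil => intro init h t; simp [pvLevelB]
  | cons c cs ih =>
    intro init h t
    cases init with
    | nil => simp at h
    | cons x u =>
      simp only [pvLevelB, List.zip_cons_cons, List.map_cons]
      exact List.Forall₂.cons (min_le_left _ _) (ih u (by simpa using h) t)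

theorem pv_level_mono (caps init : List Int) {t s : Int} (h : t ≤ s) :
    List.Forall₂ (· ≤ ·) (pvLevelB caps init t) (pvLevelB caps init s) := by
  simp only [pvLevelB, List.forall₂_map_left_iff, List.forall₂_map_right_iff]
  rw [List.forall₂_same]
  intro p _
  omega

theorem pv_filled_mono (caps init : List Int) {t s : Int} (h : t ≤ s) :
    pvFilledB caps init t ≤ pvFilledB caps init s :=
  pv_sum_le_of_forall₂ (pv_level_mono caps init h)

theorem pv_filled_succ : ∀ (caps init : List Int), init.length = caps.length → ∀ (t : Int),
    pvFilledB caps init (t + 1) = pvFilledB caps init t + pvUnsat caps (pvLevelB caps init t) := by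
  intro caps
  induction caps with
  | nil => intro init h t; rfl
  | cons c cs ih =>
    intro init h t
    cases init with
    | nil => simp at h
    | cons x u =>
      have ih' := ih u (by simpa using h) t
      rw [pv_filled_cons, pv_filled_cons, pv_level_cons, pv_unsat_cons, ih']
      split_ifs <;> omega

theorem pv_filled_capsum_of_unsat_zero : ∀ (caps init : List Int), init.length = caps.length → ∀ (t : Int),
    pvUnsat caps (pvLevelB caps init t) = 0 → pvFilledB caps init t = caps.sum := by
  intro caps
  induction caps with
  | nil => intro init h t _; rfl
  | cons c cs ih =>
    intro init h t hU
    cases init with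
    | nil => simp at h
    | cons x u =>
      rw [pv_level_cons, pv_unsat_cons] at hU
      have h1 : 0 ≤ pvUnsat cs (pvLevelB cs u t) := pv_unsat_nonneg _ _
      have h2 : ¬ (min c (x + t) < c) := by by_contra hx; rw [if_pos hx] at hU; omega
      have h3 : pvUnsat cs (pvLevelB cs u t) = 0 := by rw [if_neg h2] at hU; omega
      have := ih u (by simpa using h) t h3
      rw [pv_filled_cons, this, List.sum_cons]
      omega

theorem pv_filled_capsum_top : ∀ (caps init : List Int),
    List.Forall₂ (fun x c => 0 ≤ x ∧ x ≤ c) init caps → ∀ (hi : Int), (∀ c' ∈ caps, c' ≤ hi) →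
    pvFilledB caps init (hi + 1) = caps.sum := by
  intro caps init h
  induction h with
  | nil => intro hi _; rfl
  | @cons x c u cs hx _ ih =>
    intro hi hcap
    have := ih hi (fun c' hc' => hcap c' (by simp [hc']))
    rw [pv_filled_cons, this, List.sum_cons]
    have hc : c ≤ hi := hcap c (by simp)
    omega

theorem pv_fillVals_full : ∀ {u cs : List Int}, List.Forall₂ (fun x c => x ≤ c) u cs →
    ∀ {b : Int}, pvUnsat cs u ≤ b →
    pvFillVals cs u b = (cs.zip u).map (fun p => min p.1 (p.2 + 1)) := by
  intro u cs h
  induction h with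
  | nil => intro b _; rfl
  | @cons x c u cs hx htail ih =>
    intro b hb
    rw [pv_unsat_cons] at hb
    have hU := pv_unsat_nonneg cs u
    by_cases hxc : x < c
    · rw [if_pos hxc] at hb
      simp only [pvFillVals, List.zip_cons_cons, List.map_cons,
        if_pos (show 0 < b ∧ x < c by constructor <;> omega)]
      rw [ih (by omega)]
      congr 1
      omega
    · rw [if_neg hxc] at hb
      simp only [pvFillVals, List.zip_cons_cons, List.map_cons,
        if_neg (show ¬ (0 < b ∧ x < c) from fun hcon => hxc hcon.2)]
      rw [ih (by omega)]
      congr 1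
      omega

theorem pv_level_succ : ∀ (caps init : List Int) (t : Int),
    (caps.zip (pvLevelB caps init t)).map (fun p => min p.1 (p.2 + 1)) = pvLevelB caps init (t + 1) := by
  intro caps
  induction caps with
  | nil => intro init t; simp [pvLevelB]
  | cons c cs ih =>
    intro init t
    cases init with
    | nil => simp [pvLevelB]
    | cons x u =>
      simp only [pvLevelB, List.zip_cons_cons, List.map_cons] at *
      rw [ih u t]
      congr 1
      omega

-- uniqueness of the water-filling output over valid stopping levels
theorem pv_out_unique (caps init : List Int) (target : Int)
    (hlen : init.length = caps.length)
    (hinit : List.Forall₂ (fun x c => 0 ≤ x ∧ x ≤ c) init caps) :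
    ∀ {t1 t2 : Int}, pvGood caps init target t1 → pvGood caps init target t2 →
    pvOut caps init target t1 = pvOut caps init target t2 := by
  have key : ∀ t1 t2 : Int, t1 < t2 → pvGood caps init target t1 → pvGood caps init target t2 →
      pvOut caps init target t1 = pvOut caps init target t2 := by
    intro t1 t2 hlt ⟨_, h1le, h1ge⟩ ⟨_, h2le, _⟩
    have hmono : pvFilledB caps init (t1 + 1) ≤ pvFilledB caps init t2 :=
      pv_filled_mono caps init (by omega)
    have he1 : pvFilledB caps init (t1 + 1) = target := by omega
    have he2 : pvFilledB caps init t2 = target := by omega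
    have hlevel : pvLevelB caps init (t1 + 1) = pvLevelB caps init t2 := by
      apply pv_eq_of_forall₂_le_sum (pv_level_mono caps init (by omega))
      show pvFilledB caps init t2 ≤ pvFilledB caps init (t1 + 1)
      omega
    have hout2 : pvOut caps init target t2 = pvLevelB caps init t2 := by
      unfold pvOut
      rw [he2, pv_fillVals_nonpos _ _ _ (by omega)]
    have hout1 : pvOut caps init target t1 = pvLevelB caps init (t1 + 1) := by
      unfold pvOut
      have hU := pv_filled_succ caps init hlen t1
      rw [pv_fillVals_full (u := pvLevelB caps init t1) (cs := caps)
        (pv_level_le caps init hlen t1) (by omega)]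
      exact pv_level_succ caps init t1
    rw [hout1, hout2, hlevel]
  intro t1 t2 h1 h2
  rcases lt_trichotomy t1 t2 with h | h | h
  · exact key t1 t2 h h1 h2
  · rw [h]
  · exact (key t2 t1 h h2 h1).symm

theorem pv_items_ofList (l : List (String × Int)) (h : (l.map Prod.fst).Nodup) :
    (PySem.Dict.ofList l).items = l := by
  have := PySem.Dict.items_foldl_insert_fresh l Prod.fst Prod.snd (PySem.Dict.empty (κ := String) (ν := Int))
    (fun a _ => PySem.Dict.contains_empty _) h
  simpa [PySem.Dict.ofList, PySem.Dict.update] using this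

theorem pv_getD_foldl_key_notmem {β : Type} (key : β → String) (v : β → Int) :
    ∀ (l : List β) (d : PySem.Dict String Int) (k : String), k ∉ l.map key →
    (l.foldl (fun d a => d.insert (key a) (v a)) d).getD k 0 = d.getD k 0 := by
  intro l
  induction l with
  | nil => intro d k _; rfl
  | cons p ps ih =>
    intro d k hk
    simp only [List.map_cons, List.mem_cons, not_or] at hk
    rw [List.foldl_cons, ih _ k (by exact hk.2), PySem.Dict.getD_insert]
    rw [if_neg hk.1]

theorem pv_getD_foldl_key {β : Type} (key : β → String) (v : β → Int) :
    ∀ (l : List β) (d : PySem.Dict String Int), (l.map key).Nodup →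
    List.Forall₂ (fun k x => (l.foldl (fun d a => d.insert (key a) (v a)) d).getD k 0 = x)
      (l.map key) (l.map v) := by
  intro l
  induction l with
  | nil => intro d _; constructor
  | cons p ps ih =>
    intro d hnd
    simp only [List.map_cons, List.nodup_cons] at hnd
    refine List.Forall₂.cons ?_ (by rw [List.foldl_cons]; exact ih _ hnd.2)
    rw [List.foldl_cons, pv_getD_foldl_key_notmem key v ps _ (key p) hnd.1,
      PySem.Dict.getD_insert, if_pos rfl]

theorem pv_insert_getD_self (d : PySem.Dict String Int) (k : String)
    (hnd : d.keys.Nodup) (hc : d.contains k = true) :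
    d.insert k (d.getD k 0) = d := by
  apply PySem.Dict.ext
  rw [PySem.Dict.items_insert_of_contains _ _ hc]
  have : ∀ p ∈ d.items, (if (p.1 == k) = true then (k, d.getD k 0) else p) = p := by
    intro p hp
    by_cases hpk : p.1 = k
    · have : d.getD p.1 0 = p.2 := PySem.Dict.getD_of_mem_items d (by exact hp) hnd 0
      subst hpk
      simp [this]
    · simp [hpk]
  rw [List.map_congr_left this]
  exact List.map_id _

theorem pv_update_zip_self (d : PySem.Dict String Int) (hnd : d.keys.Nodup) :
    ∀ {ks : List String} {u : List Int},
    List.Forall₂ (fun k x => d.getD k 0 = x) ks u →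
    (∀ k ∈ ks, d.contains k = true) →
    PySem.Dict.update d (ks.zip u) = d := by
  intro ks u h
  induction h with
  | nil => intro _; rfl
  | @cons k x ks u hx htail ih =>
    intro hc
    have hck : d.contains k = true := hc k (by simp)
    show PySem.Dict.update (d.insert k x) (ks.zip u) = d
    rw [← hx, pv_insert_getD_self d k hnd hck]
    exact ih (fun k' hk' => hc k' (by simp [hk']))

theorem pv_set_update_self (s : List String) (l : List String) (h : ∀ x ∈ l, x ∈ s) :
    PySem.Set.update s l = s := by
  rw [PySem.Set.update_eq_append_filter]
  have : List.filter (fun y => !PySem.Set.contains s y) (PySem.Set.ofList l) = [] := by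
    rw [List.filter_eq_nil_iff]
    intro a ha
    have : a ∈ l := (PySem.Set.mem_ofList l a).mp ha
    simp [PySem.Set.contains, h a this]
  rw [this, List.append_nil]

theorem pv_enum_cons {α : Type} (x : α) (xs : List α) (s : Int) :
    PySem.List.enumerate (x :: xs) s = (s, x) :: PySem.List.enumerate xs (s + 1) := rfl

theorem pv_enum_map_snd {α : Type} : ∀ (xs : List α) (s : Int),
    (PySem.List.enumerate xs s).map Prod.snd = xs := by
  intro xs
  induction xs with
  | nil => intro s; rfl
  | cons x xs ih => intro s; rw [pv_enum_cons, List.map_cons, ih]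

theorem pv_enum_length {α : Type} (xs : List α) (s : Int) :
    (PySem.List.enumerate xs s).length = xs.length := by
  have := congrArg List.length (pv_enum_map_snd xs s)
  simpa using this

theorem pv_enum_map {α β : Type} (f : α → β) : ∀ (xs : List α) (s : Int),
    PySem.List.enumerate (xs.map f) s = (PySem.List.enumerate xs s).map (fun p => (p.1, f p.2)) := by
  intro xs
  induction xs with
  | nil => intro s; rfl
  | cons x xs ih => intro s; rw [List.map_cons, pv_enum_cons, pv_enum_cons, List.map_cons, ih]

theorem pv_enum_forall₂ (P : Int → Int → Prop) (f : Int × Int → Int) : ∀ (cs : List Int),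
    (∀ i c, c ∈ cs → P (f (i, c)) c) → ∀ (s : Int),
    List.Forall₂ P ((PySem.List.enumerate cs s).map f) cs := by
  intro cs
  induction cs with
  | nil => intro _ s; constructor
  | cons c cs ih =>
    intro h s
    rw [pv_enum_cons, List.map_cons]
    exact List.Forall₂.cons (h s c (by simp)) (ih (fun i c' hc' => h i c' (by simp [hc'])) (s + 1))

theorem pv_enum_bonus_sum (base rem : Int) : ∀ (cs : List Int) (s : Int),
    ((PySem.List.enumerate cs s).map (fun p => base + if p.1 < rem then (1 : Int) else 0)).sum
      = base * cs.length + (min rem (s + cs.length) - min rem s) := by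
  intro cs
  induction cs with
  | nil => intro s; simp
  | cons c cs ih =>
    intro s
    rw [pv_enum_cons, List.map_cons, List.sum_cons, ih (s + 1)]
    simp only [List.length_cons]
    push_cast
    split_ifs <;> ring_nf <;> omega

theorem pv_forall₂_getD_insert (d : PySem.Dict String Int) (k : String) (v : Int)
    {ks : List String} {u : List Int} (hk : k ∉ ks)
    (h : List.Forall₂ (fun k' x => d.getD k' 0 = x) ks u) :
    List.Forall₂ (fun k' x => (d.insert k v).getD k' 0 = x) ks u := by
  induction h with
  | nil => constructor
  | @cons k' x' ks' u' hx htail ih =>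
    simp only [List.mem_cons, not_or] at hk
    exact List.Forall₂.cons
      (by rw [PySem.Dict.getD_insert, if_neg (fun he => hk.1 he.symm), hx])
      (ih hk.2)

theorem pv_pass_spec (avail : PySem.Dict String Int) (target : Int) :
    ∀ (ks : List String) (cs u : List Int) (alloc : PySem.Dict String Int) (assigned : Int) (prog : Bool),
    ks.Nodup →
    List.Forall₂ (fun k c => max 0 (avail.getD k 0) = c) ks cs →
    List.Forall₂ (fun k x => alloc.getD k 0 = x) ks u →
    (∀ k ∈ ks, alloc.contains k = true) →
    alloc.keys.Nodup →
    assigned < target →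
    pvPassA avail target ks alloc assigned prog =
      (PySem.Dict.update alloc (ks.zip (pvFillVals cs u (target - assigned))),
       assigned + min (target - assigned) (pvUnsat cs u),
       prog || decide (0 < pvUnsat cs u)) := by
  intro ks
  induction ks with
  | nil =>
    intro cs u alloc assigned prog _ hcs hu _ _ hlt
    cases hcs; cases hu
    refine Prod.ext rfl (Prod.ext ?_ ?_)
    · show assigned = assigned + min (target - assigned) (pvUnsat [] [])
      simp only [pvUnsat, List.zip_nil_left, List.countP_nil]
      omega
    · show prog = (prog || decide (0 < pvUnsat [] []))
      simp [pvUnsat]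
  | cons k ks ih =>
    intro cs u alloc assigned prog hnd hcs hu hcont hknd hlt
    cases hcs with | cons hc hcs =>
    cases hu with | cons hx hu =>
    rename_i c cs' x u'
    simp only [List.nodup_cons] at hnd
    have hck : alloc.contains k = true := hcont k (by simp)
    simp only [pvPassA]
    rw [hx, hc]
    have hUnn := pv_unsat_nonneg cs' u'
    by_cases hxc : x < c
    · rw [if_pos hxc]
      have hcons : pvUnsat (c :: cs') (x :: u') = 1 + pvUnsat cs' u' := by
        rw [pv_unsat_cons, if_pos hxc]
      -- invariants for alloc.insert k (x + 1)
      have hu' : List.Forall₂ (fun k' x' => (alloc.insert k (x + 1)).getD k' 0 = x') ks u' :=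
        pv_forall₂_getD_insert alloc k (x + 1) hnd.1 hu
      have hcont' : ∀ k' ∈ ks, (alloc.insert k (x + 1)).contains k' = true := by
        intro k' hk'
        rw [PySem.Dict.contains_insert]
        simp [hcont k' (by simp [hk'])]
      have hknd' := PySem.Dict.nodup_keys_insert alloc k (x + 1) hknd
      by_cases hbreak : assigned + 1 ≥ target
      · rw [if_pos hbreak]
        have hb1 : target - assigned = 1 := by omega
        simp only [hb1]
        rw [show (pvFillVals (c :: cs') (x :: u') 1) = (x + 1) :: pvFillVals cs' u' (1 - 1) from
          by simp [pvFillVals, hxc]]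
        rw [show (1 : Int) - 1 = 0 from rfl, pv_fillVals_nonpos cs' u' 0 le_rfl]
        have hupd : PySem.Dict.update alloc ((k, x + 1) :: ks.zip u') = alloc.insert k (x + 1) := by
          show PySem.Dict.update (alloc.insert k (x + 1)) (ks.zip u') = _
          exact pv_update_zip_self _ hknd' hu' hcont'
        rw [List.zip_cons_cons, hupd, hcons]
        refine Prod.ext rfl (Prod.ext ?_ ?_)
        · show assigned + 1 = assigned + min 1 (1 + pvUnsat cs' u')
          omega
        · show true = (prog || decide (0 < 1 + pvUnsat cs' u'))
          simp [show (0:Int) < 1 + pvUnsat cs' u' by omega]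
      · rw [if_neg hbreak]
        have hb0 : (0:Int) < target - assigned := by omega
        have hrec := ih cs' u' (alloc.insert k (x + 1)) (assigned + 1) true
          hnd.2 hcs hu' hcont' hknd' (by omega)
        rw [show target - (assigned + 1) = target - assigned - 1 from by ring] at hrec
        have hfv : pvFillVals (c :: cs') (x :: u') (target - assigned) =
            (x + 1) :: pvFillVals cs' u' (target - assigned - 1) := by
          rw [pvFillVals, if_pos ⟨hb0, hxc⟩]
        rw [hrec, hfv, List.zip_cons_cons, hcons]
        refine Prod.ext rfl (Prod.ext ?_ ?_)
        · show assigned + 1 + min (target - assigned - 1) (pvUnsat cs' u') =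
            assigned + min (target - assigned) (1 + pvUnsat cs' u')
          omega
        · show (true || decide (0 < pvUnsat cs' u')) = (prog || decide (0 < 1 + pvUnsat cs' u'))
          simp [show (0:Int) < 1 + pvUnsat cs' u' by omega]
    · rw [if_neg hxc]
      have hcons : pvUnsat (c :: cs') (x :: u') = pvUnsat cs' u' := by
        rw [pv_unsat_cons, if_neg hxc]; ring
      have hrec := ih cs' u' alloc assigned prog hnd.2 hcs hu
        (fun k' hk' => hcont k' (by simp [hk'])) hknd hlt
      rw [hrec]
      rw [show (pvFillVals (c :: cs') (x :: u') (target - assigned)) =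
        x :: pvFillVals cs' u' (target - assigned) from
        by simp [pvFillVals, hxc]]
      rw [List.zip_cons_cons, hcons]
      have hupd : PySem.Dict.update alloc ((k, x) :: ks.zip (pvFillVals cs' u' (target - assigned)))
          = PySem.Dict.update alloc (ks.zip (pvFillVals cs' u' (target - assigned))) := by
        show PySem.Dict.update (alloc.insert k x) _ = _
        rw [← hx, pv_insert_getD_self alloc k hknd hck]
      rw [hupd]

theorem pv_fillVals_length : ∀ (cs u : List Int) (b : Int), (pvFillVals cs u b).length = u.length := by
  intro cs
  induction cs with
  | nil => intro u b; cases u <;> rfl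
  | cons c cs ih =>
    intro u b
    cases u with
    | nil => rfl
    | cons x u => by_cases h : 0 < b ∧ x < c <;> simp [pvFillVals, h, ih]

theorem pv_update_full_getD (alloc : PySem.Dict String Int) (KEYS : List String) (vals : List Int)
    (hnd : KEYS.Nodup) (hlen : vals.length = KEYS.length) :
    List.Forall₂ (fun k x => (PySem.Dict.update alloc (KEYS.zip vals)).getD k 0 = x) KEYS vals := by
  have h1 : (KEYS.zip vals).map Prod.fst = KEYS := List.map_fst_zip (by omega)
  have h2 : (KEYS.zip vals).map Prod.snd = vals := List.map_snd_zip (by omega)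
  have h3 := pv_getD_foldl_key Prod.fst Prod.snd (KEYS.zip vals) alloc (by rw [h1]; exact hnd)
  rw [h1, h2] at h3
  simpa [PySem.Dict.update] using h3

theorem pv_update_keys (alloc : PySem.Dict String Int) (ps : List (String × Int)) :
    (PySem.Dict.update alloc ps).keys = PySem.Set.update alloc.keys (ps.map Prod.fst) := by
  have := PySem.Dict.keys_foldl_insert_key ps Prod.fst (fun _ p => p.2) alloc
  simpa [PySem.Dict.update] using this

theorem pv_while_stop (avail : PySem.Dict String Int) (keys : List String) (target : Int) :
    ∀ (f : Nat) (alloc : PySem.Dict String Int) (a : Int), ¬ (a < target) →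
    pvWhileA avail keys target f alloc a = alloc := by
  intro f alloc a h
  cases f <;> simp [pvWhileA, h]

theorem pv_while_spec (avail : PySem.Dict String Int) (KEYS : List String) (caps init : List Int)
    (target : Int)
    (hND : KEYS.Nodup)
    (hCAP : List.Forall₂ (fun k c => max 0 (avail.getD k 0) = c) KEYS caps)
    (hlen : init.length = caps.length)
    (htc : target ≤ caps.sum) :
    ∀ (fuel : Nat) (t : Int) (alloc : PySem.Dict String Int),
    0 ≤ t →
    List.Forall₂ (fun k x => alloc.getD k 0 = x) KEYS (pvLevelB caps init t) →
    alloc.keys = KEYS →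
    pvFilledB caps init t ≤ target →
    (target - pvFilledB caps init t).toNat < fuel →
    ∃ t', pvGood caps init target t' ∧
      (pvWhileA avail KEYS target fuel alloc (pvFilledB caps init t)).keys = KEYS ∧
      List.Forall₂
        (fun k x => (pvWhileA avail KEYS target fuel alloc (pvFilledB caps init t)).getD k 0 = x)
        KEYS (pvOut caps init target t') := by
  have hKC : KEYS.length = caps.length := hCAP.length_eq
  intro fuel
  induction fuel with
  | zero => intro t alloc _ _ _ _ h; omega
  | succ fuel ih =>
    intro t alloc ht0 hval hkeys hle hfuel
    by_cases hlt : pvFilledB caps init t < target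
    · -- the while body runs; characterize the pass
      have hknd : alloc.keys.Nodup := by rw [hkeys]; exact hND
      have hcont : ∀ k ∈ KEYS, alloc.contains k = true := by
        intro k hk
        rw [PySem.Dict.contains_iff_mem_keys, hkeys]
        exact hk
      have hpass := pv_pass_spec avail target KEYS caps (pvLevelB caps init t) alloc
        (pvFilledB caps init t) false hND hCAP hval hcont hknd hlt
      have hU0 : 0 < pvUnsat caps (pvLevelB caps init t) := by
        rcases lt_or_eq_of_le (pv_unsat_nonneg caps (pvLevelB caps init t)) with h | h
        · exact h
        · exact absurd (pv_filled_capsum_of_unsat_zero caps init hlen t h.symm) (by omega)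
      have hsucc := pv_filled_succ caps init hlen t
      have hlvlen : (pvLevelB caps init t).length = KEYS.length := by
        simp [pvLevelB, List.length_zip]
        omega
      have hfvlen : ∀ b : Int, (pvFillVals caps (pvLevelB caps init t) b).length = KEYS.length := by
        intro b
        rw [pv_fillVals_length]
        exact hlvlen
      -- the state after the pass
      have hkeys' : ∀ b : Int,
          (PySem.Dict.update alloc (KEYS.zip (pvFillVals caps (pvLevelB caps init t) b))).keys = KEYS := by
        intro b
        rw [pv_update_keys, List.map_fst_zip (by rw [hfvlen]), hkeys]
        exact pv_set_update_self KEYS KEYS (fun x hx => hx)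
      have hval' : ∀ b : Int, List.Forall₂
          (fun k x => (PySem.Dict.update alloc (KEYS.zip (pvFillVals caps (pvLevelB caps init t) b))).getD k 0 = x)
          KEYS (pvFillVals caps (pvLevelB caps init t) b) := by
        intro b
        exact pv_update_full_getD alloc KEYS _ hND (hfvlen b)
      simp only [pvWhileA, if_pos hlt, hpass]
      simp only [Bool.false_or, hU0, if_pos, decide_true]
      by_cases hfull : pvFilledB caps init (t + 1) ≤ target
      · -- a full pass: recurse at level t + 1
        have hmin : min (target - pvFilledB caps init t) (pvUnsat caps (pvLevelB caps init t))
            = pvUnsat caps (pvLevelB caps init t) := by omega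
        have hfv : pvFillVals caps (pvLevelB caps init t) (target - pvFilledB caps init t)
            = pvLevelB caps init (t + 1) := by
          rw [pv_fillVals_full (u := pvLevelB caps init t) (cs := caps)
            (pv_level_le caps init hlen t) (by omega)]
          exact pv_level_succ caps init t
        rw [hmin, hfv]
        rw [show pvFilledB caps init t + pvUnsat caps (pvLevelB caps init t)
          = pvFilledB caps init (t + 1) from by omega]
        refine ih (t + 1) _ (by omega) ?_ ?_ hfull (by omega)
        · have := hval' (target - pvFilledB caps init t)
          rw [hfv] at this
          exact this
        · have := hkeys' (target - pvFilledB caps init t)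
          rw [hfv] at this
          exact this
      · -- a partial pass: the budget runs out, assigned reaches target and the loop stops
        have hmin : min (target - pvFilledB caps init t) (pvUnsat caps (pvLevelB caps init t))
            = target - pvFilledB caps init t := by omega
        rw [hmin]
        rw [show pvFilledB caps init t + (target - pvFilledB caps init t) = target from by ring]
        rw [pv_while_stop avail KEYS target fuel _ target (by omega)]
        refine ⟨t, ⟨ht0, by omega, by omega⟩, hkeys' _, hval' _⟩
    · -- the while condition fails immediately
      rw [pv_while_stop avail KEYS target (fuel + 1) alloc _ hlt]
      refine ⟨t, ⟨ht0, hle, ?_⟩, hkeys, ?_⟩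
      · have := pv_filled_mono caps init (show t ≤ t + 1 by omega)
        omega
      · unfold pvOut
        rw [show target - pvFilledB caps init t = 0 from by omega,
          pv_fillVals_nonpos _ _ _ le_rfl]
        exact hval

theorem pv_search_spec (caps init : List Int) (target : Int) :
    ∀ (fuel : Nat) (lo hi : Int), 0 ≤ lo → lo ≤ hi →
    pvFilledB caps init lo ≤ target → target ≤ pvFilledB caps init (hi + 1) →
    (hi - lo).toNat < fuel →
    pvGood caps init target (pvSearchB caps init target fuel lo hi) := by
  intro fuel
  induction fuel with
  | zero => intro lo hi _ _ _ _ h; omega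
  | succ fuel ih =>
    intro lo hi h0 hlh hlo hhi hfuel
    by_cases hlt : lo < hi
    · have hb : lo + 1 ≤ PySem.Int.floordiv (lo + hi + 1) 2 ∧
          PySem.Int.floordiv (lo + hi + 1) 2 ≤ hi := by
        rw [show lo + hi + 1 = (lo + 1) + hi from by ring]
        exact PySem.Int.floordiv_two_mid_bounds (by omega)
      simp only [pvSearchB, if_pos hlt]
      by_cases hm : pvFilledB caps init (PySem.Int.floordiv (lo + hi + 1) 2) ≤ target
      · rw [if_pos hm]
        exact ih _ hi (by omega) (by omega) hm hhi (by omega)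
      · rw [if_neg hm]
        refine ih lo _ h0 (by omega) hlo ?_ (by omega)
        rw [show PySem.Int.floordiv (lo + hi + 1) 2 - 1 + 1
          = PySem.Int.floordiv (lo + hi + 1) 2 from by ring]
        omega
    · simp only [pvSearchB, if_neg hlt]
      have heq : lo = hi := by omega
      exact ⟨h0, hlo, by rw [heq]; exact hhi⟩

theorem pv_init_sum_nonneg : ∀ {init caps : List Int},
    List.Forall₂ (fun x c => 0 ≤ x ∧ x ≤ c) init caps → 0 ≤ init.sum := by
  intro init caps h
  induction h with
  | nil => simp
  | cons hx _ ih => simp only [List.sum_cons]; omega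

theorem pv_fillB_zip : ∀ (ks : List String) (cs vs : List Int) (b : Int),
    ks.length = cs.length → cs.length = vs.length →
    pvFillB (ks.zip (cs.zip vs)) b = ks.zip (pvFillVals cs vs b) := by
  intro ks
  induction ks with
  | nil => intro cs vs b _ _; rfl
  | cons k ks ih =>
    intro cs vs b h1 h2
    cases cs with
    | nil => simp at h1
    | cons c cs =>
      cases vs with
      | nil => simp at h2
      | cons v vs =>
        simp only [List.zip_cons_cons, pvFillB, pvFillVals]
        by_cases h : 0 < b ∧ v < c
        · rw [if_pos h, if_pos h, ih cs vs (b - 1) (by simpa using h1) (by simpa using h2),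
            List.zip_cons_cons]
        · rw [if_neg h, if_neg h, ih cs vs b (by simpa using h1) (by simpa using h2),
            List.zip_cons_cons]

theorem pv_main_eq (total : Int) (availability : List (String × Int))
    (hpre : (availability.map Prod.fst).Nodup) :
    allocate_balanced total availability = allocate_balanced_alt total availability := by
  have hKnd : (PySem.Dict.ofList availability).keys.Nodup := PySem.Dict.nodup_keys_ofList availability
  have hitems : (PySem.Dict.ofList availability).items = availability := pv_items_ofList availability hpre
  simp only [allocate_balanced, allocate_balanced_alt]
  set D := PySem.Dict.ofList availability with hD
  set KEYS := D.keys with hKEYS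
  by_cases hz : total ≤ 0 ∨ KEYS = []
  · rw [if_pos hz, if_pos (by rcases hz with h | h; exact Or.inl h; exact Or.inr (by simp [h]))]
    have h1 := PySem.Dict.items_foldl_insert_fresh KEYS (fun k => k) (fun _ => (0 : Int))
      PySem.Dict.empty (fun a _ => PySem.Dict.contains_empty a) (by simpa using hKnd)
    have h2 : PySem.List.dedup KEYS = KEYS := PySem.Set.ofList_eq_self_of_nodup KEYS hKnd
    rw [h2]
    simpa using h1
  · rw [if_neg hz, if_neg (by rw [List.length_eq_zero_iff]; exact hz)]
    have htotal : 0 < total := by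
      by_contra h
      exact hz (Or.inl (by omega))
    have hne : KEYS ≠ [] := fun h => hz (Or.inr h)
    have hn : 0 < KEYS.length := List.length_pos_iff.mpr hne
    set capsB := D.values.map (fun v => max 0 v) with hcapsB
    set target := min total capsB.sum with htarget
    set base := PySem.Int.floordiv target (KEYS.length : Int) with hbaseDef
    set rem := PySem.Int.mod target (KEYS.length : Int) with hremDef
    set init := (PySem.List.enumerate capsB).map
      (fun p => min p.2 (base + if p.1 < rem then 1 else 0)) with hInit
    -- basic inequalities
    have hcap0 : ∀ c ∈ capsB, 0 ≤ c := by
      intro c hc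
      rw [hcapsB] at hc
      obtain ⟨v, _, rfl⟩ := List.mem_map.mp hc
      exact le_max_left 0 v
    have hsumcap : 0 ≤ capsB.sum := List.sum_nonneg hcap0
    have htpos : 0 ≤ target := le_min (by omega) hsumcap
    have htc : target ≤ capsB.sum := min_le_right _ _
    have hnz : (0 : Int) < (KEYS.length : Int) := by exact_mod_cast hn
    have hbase : 0 ≤ base := by
      rw [hbaseDef, PySem.Int.floordiv_eq_ediv_of_pos hnz]
      exact Int.ediv_nonneg htpos (by omega)
    have hrem0 : 0 ≤ rem := PySem.Int.mod_nonneg target hnz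
    have hremlt : rem < (KEYS.length : Int) := PySem.Int.mod_lt target hnz
    -- lengths
    have hcaplen : capsB.length = KEYS.length := by
      rw [hcapsB, hKEYS, List.length_map]
      simp [PySem.Dict.keys, PySem.Dict.values]
    have hlen : init.length = capsB.length := by
      rw [hInit, List.length_map, pv_enum_length]
    -- the cap list seen through getD
    have hcapex : KEYS.map (fun k => max 0 (D.getD k 0)) = capsB := by
      rw [hcapsB, PySem.Dict.values_eq_map_keys D hKnd 0, List.map_map]
      rfl
    have hcapforall : List.Forall₂ (fun k c => max 0 (D.getD k 0) = c) KEYS capsB := by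
      rw [← hcapex, List.forall₂_map_right_iff, List.forall₂_same]
      intro k _
      rfl
    -- init bounds and sum
    have hin : List.Forall₂ (fun x c => 0 ≤ x ∧ x ≤ c) init capsB := by
      rw [hInit]
      refine pv_enum_forall₂ _ _ capsB (fun i c hc => ⟨?_, min_le_left _ _⟩) 0
      have := hcap0 c hc
      have hb : 0 ≤ base + if i < rem then (1 : Int) else 0 := by split_ifs <;> omega
      omega
    have hsum : init.sum ≤ target := by
      have h1 : init.sum ≤ ((PySem.List.enumerate capsB 0).map
          (fun p => base + if p.1 < rem then (1 : Int) else 0)).sum := by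
        rw [hInit]
        apply pv_sum_le_of_forall₂
        rw [List.forall₂_map_left_iff, List.forall₂_map_right_iff, List.forall₂_same]
        intro p _
        exact min_le_right _ _
      rw [pv_enum_bonus_sum base rem capsB 0, hcaplen] at h1
      have h2 : base * (KEYS.length : Int) + rem = target :=
        PySem.Int.floordiv_mul_add_mod target (KEYS.length : Int)
      omega
    have hfilled0 : pvFilledB capsB init 0 = init.sum := by
      unfold pvFilledB
      rw [pv_level_zero hin]
    -- A's initial allocation loop
    have hvalA : List.Forall₂ (fun k x =>
        ((PySem.List.enumerate KEYS).foldl (fun d p => d.insert p.2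
          (min (max 0 (D.getD p.2 0)) (base + if p.1 < rem then 1 else 0)))
          (KEYS.foldl (fun d k => d.insert k 0) PySem.Dict.empty)).getD k 0 = x) KEYS init := by
      have h := pv_getD_foldl_key Prod.snd
        (fun p => min (max 0 (D.getD p.2 0)) (base + if p.1 < rem then 1 else 0))
        (PySem.List.enumerate KEYS) (KEYS.foldl (fun d k => d.insert k 0) PySem.Dict.empty)
        (by rw [pv_enum_map_snd]; exact hKnd)
      rw [pv_enum_map_snd] at h
      have hInitEq : (PySem.List.enumerate KEYS 0).map
          (fun p => min (max 0 (D.getD p.2 0)) (base + if p.1 < rem then 1 else 0)) = init := by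
        rw [hInit, ← hcapex, pv_enum_map (fun k => max 0 (D.getD k 0)) KEYS 0, List.map_map]
        rfl
      rw [hInitEq] at h
      exact h
    have hkeys0 : (KEYS.foldl (fun d k => d.insert k (0 : Int)) PySem.Dict.empty).keys = KEYS := by
      have h := PySem.Dict.keys_foldl_insert KEYS (fun _ _ => (0 : Int)) PySem.Dict.empty
      have h2 : PySem.Set.update (PySem.Dict.empty (κ := String) (ν := Int)).keys KEYS = KEYS := by
        show PySem.Set.update ([] : List String) KEYS = KEYS
        rw [PySem.Set.update_nil_left]
        exact PySem.Set.ofList_eq_self_of_nodup KEYS hKnd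
      exact h.trans h2
    have hkeys1 : ((PySem.List.enumerate KEYS).foldl (fun d p => d.insert p.2
          (min (max 0 (D.getD p.2 0)) (base + if p.1 < rem then 1 else 0)))
          (KEYS.foldl (fun d k => d.insert k 0) PySem.Dict.empty)).keys = KEYS := by
      have h := PySem.Dict.keys_foldl_insert_key (PySem.List.enumerate KEYS) Prod.snd
        (fun _ p => min (max 0 (D.getD p.2 0)) (base + if p.1 < rem then 1 else 0))
        (KEYS.foldl (fun d k => d.insert k 0) PySem.Dict.empty)
      rw [pv_enum_map_snd] at h
      have h2 : PySem.Set.update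
          (KEYS.foldl (fun d k => d.insert k (0 : Int)) PySem.Dict.empty).keys KEYS = KEYS := by
        rw [hkeys0]
        exact pv_set_update_self KEYS KEYS (fun x hx => hx)
      exact h.trans h2
    have hassigned : ((PySem.List.enumerate KEYS).foldl (fun d p => d.insert p.2
          (min (max 0 (D.getD p.2 0)) (base + if p.1 < rem then 1 else 0)))
          (KEYS.foldl (fun d k => d.insert k 0) PySem.Dict.empty)).values.sum
          = pvFilledB capsB init 0 := by
      rw [PySem.Dict.values_eq_map_keys _ (by rw [hkeys1]; exact hKnd) 0, hkeys1,
        pv_map_eq_of_forall₂ hvalA, hfilled0]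
    -- run the while loop
    have hwhile := pv_while_spec D KEYS capsB init target hKnd hcapforall hlen htc
      (target.toNat + 1) 0 _ le_rfl (by rw [pv_level_zero hin]; exact hvalA) hkeys1
      (by rw [hfilled0]; exact hsum)
      (by have := pv_init_sum_nonneg hin; rw [hfilled0]; omega)
    obtain ⟨t', hG', hkR, hvR⟩ := hwhile
    rw [← hassigned] at hkR hvR
    have hAitems : ((pvWhileA D KEYS target (target.toNat + 1)
        ((PySem.List.enumerate KEYS).foldl (fun d p => d.insert p.2
          (min (max 0 (D.getD p.2 0)) (base + if p.1 < rem then 1 else 0)))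
          (KEYS.foldl (fun d k => d.insert k 0) PySem.Dict.empty))
        ((PySem.List.enumerate KEYS).foldl (fun d p => d.insert p.2
          (min (max 0 (D.getD p.2 0)) (base + if p.1 < rem then 1 else 0)))
          (KEYS.foldl (fun d k => d.insert k 0) PySem.Dict.empty)).values.sum)).items
        = KEYS.zip (pvOut capsB init target t') := by
      rw [PySem.Dict.items_eq_map_keys _ (by rw [hkR]; exact hKnd) 0, hkR]
      exact pv_map_eq_zip_of_forall₂ hvR
    rw [hAitems]
    -- B's side: the maximum cap and the binary search
    have hcapne : capsB ≠ [] := by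
      intro h
      rw [h] at hcaplen
      simp at hcaplen
      omega
    obtain ⟨m, hmax⟩ : ∃ m, PySem.List.max? capsB (fun x => x) = some m := by
      cases hc : PySem.List.max? capsB (fun x => x) with
      | none => exact absurd ((PySem.List.max?_eq_none_iff capsB _).mp hc) hcapne
      | some m => exact ⟨m, rfl⟩
    · simp only [hmax]
      have hm_max : ∀ c ∈ capsB, c ≤ m := fun y hy => PySem.List.max?_isMax hmax y hy
      have h0m : 0 ≤ m := hcap0 m (PySem.List.max?_mem hmax)
      have hGL := pv_search_spec capsB init target (m.toNat + 1) 0 m le_rfl h0m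
        (by rw [hfilled0]; exact hsum)
        (by rw [pv_filled_capsum_top capsB init hin m hm_max]; exact htc)
        (by omega)
      have hlvlen : (pvLevelB capsB init (pvSearchB capsB init target (m.toNat + 1) 0 m)).length
          = capsB.length := by
        simp [pvLevelB, List.length_zip]
        omega
      rw [pv_fillB_zip KEYS capsB _ _ hcaplen.symm hlvlen.symm]
      have hznd : ((KEYS.zip (pvFillVals capsB
          (pvLevelB capsB init (pvSearchB capsB init target (m.toNat + 1) 0 m))
          (target - (pvLevelB capsB init (pvSearchB capsB init target (m.toNat + 1) 0 m)).sum))).map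
          Prod.fst).Nodup := by
        rw [List.map_fst_zip (by rw [pv_fillVals_length, hlvlen, hcaplen])]
        exact hKnd
      rw [pv_items_ofList _ hznd]
      have : pvOut capsB init target t' = pvOut capsB init target
          (pvSearchB capsB init target (m.toNat + 1) 0 m) :=
        pv_out_unique capsB init target hlen hin hG' hGL
      rw [this]
      rfl

-- ===== VERDICT (by name: the statement is the Claim_ definition above) =====
theorem allocate_balanced_spec : Claim_equal_allocate_balanced := by
  intro total availability _ hpre
  exact pv_main_eq total availability hpre
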